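-- pv_equiv track=rewrite | github.com/joscha-bruegmann/tree-restructurer | TreeRestructureFunctions.py | getAssignmentPermutations
-- ===== SOURCE A (Python) =====
-- from itertools import product
--
-- def getAssignmentPermutations(A: list, B: list, wildcardsOfA: list):
--     """returns a list of sets of permutations of the indices of A and B.\n
--     The index of the elements of the set correspond to the index of elements in A and the value in the set for that index corresponds to the index where the element was found in B
--     Any results that don't have increasing indices throughout the individual set get filtered out.\n
--     Two lists [a, b] and [a, a, b, b, a] would result in a list [(0, 2), (0, 3), (1, 2), (1, 3)]. The tuples (4, 2) and (4, 3) get filtered.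
--     """
--
--     if len(A) != len(wildcardsOfA):
--         raise ValueError("Wildcards doesn't have the appropriate amount of values.")
--     if len(A) > len(B):
--         return []
--
--     # First get all individually possible positions
--     possiblePositions = [[] for _ in A]
--     for i in range(len(A)):
--         for j in range(i, len(B) - (len(A) - i - 1)):
--             # Anything before i and after len(B)-(len(A)-i-1)
--             # couldn't be part of a permutation
--             if A[i] == B[j] or wildcardsOfA[i]:
--                 possiblePositions[i].append(j)
--
--     # I think the product is what I want...
--     p = product(*possiblePositions)
--     # Throw out any result that doesn't follow the order of occurence.
--     res = []
--     for l in p: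
--         b = True
--         c = -1
--         for i in l:
--             if i <= c:
--                 b = False
--                 break
--             else:
--                 c = i
--         if b:
--             res.append(l)
--
--     return res
-- ===== SOURCE B (Python) =====
-- def getAssignmentPermutations(A: list, B: list, wildcardsOfA: list):
--     """DFS/backtracking: extend partial assignments with only indices j > prev,
--     instead of building the full cartesian product and filtering."""
--     if len(A) != len(wildcardsOfA):
--         raise ValueError("Wildcards doesn't have the appropriate amount of values.")
--     if len(A) > len(B):
--         return []
--     nA, nB = len(A), len(B)
--
--     def dfs(i, prev):
--         if i >= nA:
--             return [()]
--         res = []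
--         for j in range(i, nB - (nA - i - 1)):
--             if prev < j and (A[i] == B[j] or wildcardsOfA[i]):
--                 for tail in dfs(i + 1, j):
--                     res.append((j,) + tail)
--         return res
--
--     return dfs(0, -1)
-- ===== Notes on version B (the rewrite author's own statement) =====
-- stated objective: faster
-- what changed: Replaces the full cartesian product of candidate lists followed by an increasing-sequence filter with a DFS/backtracking enumeration that only ever extends a partial assignment with indices greater than the previous one, so non-increasing branches are pruned immediately.
import Mathlib
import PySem

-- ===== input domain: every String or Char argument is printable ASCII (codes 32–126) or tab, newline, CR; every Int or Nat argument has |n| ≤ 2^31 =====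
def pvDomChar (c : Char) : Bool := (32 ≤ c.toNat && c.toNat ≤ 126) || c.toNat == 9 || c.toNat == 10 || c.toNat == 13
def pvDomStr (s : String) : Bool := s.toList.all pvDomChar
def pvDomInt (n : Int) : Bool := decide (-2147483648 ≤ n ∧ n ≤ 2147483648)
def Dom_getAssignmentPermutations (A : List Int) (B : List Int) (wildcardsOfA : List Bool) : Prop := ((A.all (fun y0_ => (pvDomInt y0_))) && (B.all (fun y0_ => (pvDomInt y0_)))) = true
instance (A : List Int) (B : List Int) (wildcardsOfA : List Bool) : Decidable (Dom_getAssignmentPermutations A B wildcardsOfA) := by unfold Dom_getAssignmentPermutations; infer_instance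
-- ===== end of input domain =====

-- B replaces A's full cartesian product + increasing-filter with DFS backtracking that
-- only extends a partial assignment with indices greater than the previous one (faster:
-- non-increasing branches are pruned instead of enumerated).

-- ===== PORT A =====
-- the candidate positions for index i: j in [i, len(B)-(len(A)-i-1)) with A[i]==B[j] or wildcardsOfA[i]
def possPositions (A : List Int) (B : List Int) (w : List Bool) (i : Int) : List Int :=
  (PySem.List.pyRange i ((B.length : Int) - ((A.length : Int) - i - 1)) 1).filter
    (fun j => (PySem.List.pyGet? A i == PySem.List.pyGet? B j) || (PySem.List.pyGet? w i).getD false)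

-- itertools.product(*lists): all tuples in lexicographic order
def pyProduct : List (List Int) → List (List Int)
  | [] => [[]]
  | l :: ls => l.flatMap (fun x => (pyProduct ls).map (x :: ·))

-- the inner for-loop of A: flag b / last value c; true iff strictly increasing and first element > c
def incChk : List Int → Int → Bool
  | [], _ => true
  | j :: t, c => if j ≤ c then false else incChk t j

def getAssignmentPermutations (A : List Int) (B : List Int) (wildcardsOfA : List Bool) : List (List Int) :=
  if A.length ≠ wildcardsOfA.length then []   -- Python raises ValueError here; excluded by Pre_
  else if B.length < A.length then []
  else
    (pyProduct ((PySem.List.pyRange 0 (A.length : Int) 1).map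
      (possPositions A B wildcardsOfA))).filter (fun l => incChk l (-1))

-- ===== PORT B =====
-- dfs(i, prev) of Source B, structurally recursing on k = len(A) - i (the number of rows left);
-- the current index is i = len(A) - k.
def dfsB (A : List Int) (B : List Int) (w : List Bool) : Nat → Int → List (List Int)
  | 0, _ => [[]]
  | k + 1, prev =>
    (PySem.List.pyRange ((A.length : Int) - (k + 1))
        ((B.length : Int) - ((A.length : Int) - ((A.length : Int) - (k + 1)) - 1)) 1).flatMap
      (fun j =>
        if prev < j && ((PySem.List.pyGet? A ((A.length : Int) - (k + 1)) == PySem.List.pyGet? B j)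
            || (PySem.List.pyGet? w ((A.length : Int) - (k + 1))).getD false)
        then (dfsB A B w k j).map (j :: ·) else [])

def getAssignmentPermutations_alt (A : List Int) (B : List Int) (wildcardsOfA : List Bool) : List (List Int) :=
  if A.length ≠ wildcardsOfA.length then []   -- Python raises ValueError here; excluded by Pre_
  else if B.length < A.length then []
  else dfsB A B wildcardsOfA A.length (-1)

-- ===== PRECONDITION & SPEC =====
-- Pre_ excludes exactly the inputs where Python A raises ValueError (len(A) != len(wildcardsOfA)).
def Pre_getAssignmentPermutations (A : List Int) (B : List Int) (wildcardsOfA : List Bool) : Prop :=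
  A.length = wildcardsOfA.length
instance (A : List Int) (B : List Int) (wildcardsOfA : List Bool) : Decidable (Pre_getAssignmentPermutations A B wildcardsOfA) := by unfold Pre_getAssignmentPermutations; infer_instance

def pvWitness_getAssignmentPermutations : List Int × List Int × List Bool :=
  ([1, 2], [1, 1, 2, 2, 1], [false, false])

def Spec_getAssignmentPermutations (A : List Int) (B : List Int) (wildcardsOfA : List Bool) (out : List (List Int)) : Prop := out = getAssignmentPermutations_alt A B wildcardsOfA
instance (A : List Int) (B : List Int) (wildcardsOfA : List Bool) (out : List (List Int)) : Decidable (Spec_getAssignmentPermutations A B wildcardsOfA out) := by unfold Spec_getAssignmentPermutations; infer_instance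

-- ===== CLAIM (what is proved, stated in full; the proofs are below) =====
def Claim_equal_getAssignmentPermutations : Prop := ∀ (A : List Int) (B : List Int) (wildcardsOfA : List Bool), Dom_getAssignmentPermutations A B wildcardsOfA → Pre_getAssignmentPermutations A B wildcardsOfA → Spec_getAssignmentPermutations A B wildcardsOfA (getAssignmentPermutations A B wildcardsOfA)

-- ===== LEMMAS AND PROOFS =====

lemma filter_flatMap_eq {α β : Type} (l : List α) (f : α → List β) (p : β → Bool) :
    (l.flatMap f).filter p = l.flatMap (fun x => (f x).filter p) := by
  induction l with
  | nil => rfl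
  | cons x xs ih => simp [List.flatMap_cons, List.filter_append, ih]

lemma flatMap_filter_eq {α β : Type} (l : List α) (q : α → Bool) (g : α → List β) :
    (l.filter q).flatMap g = l.flatMap (fun x => if q x then g x else []) := by
  induction l with
  | nil => rfl
  | cons x xs ih =>
    by_cases h : q x <;> simp [h, List.flatMap_cons, ih]

-- filtering a cons-mapped product with incChk: the head must exceed prev, the tail is checked from the head
lemma filter_incChk_map_cons (l : List (List Int)) (j prev : Int) :
    ((l.map (j :: ·)).filter (fun t => incChk t prev))
      = if prev < j then (l.filter (fun t => incChk t j)).map (j :: ·) else [] := by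
  induction l with
  | nil => simp
  | cons t ts ih =>
    by_cases h : prev < j
    · have hj : ¬ j ≤ prev := by omega
      by_cases ht : incChk t j <;>
        simp [incChk, hj, ht, ih, h]
    · have hj : j ≤ prev := by omega
      simp [incChk, hj, ih, h]

-- main invariant: the DFS with k rows left (current index i = len(A)-k) equals
-- product-of-candidates-from-i filtered by incChk · prev
lemma dfsB_eq_filter_product (A B : List Int) (w : List Bool) :
    ∀ (k : Nat), (k : Int) ≤ (A.length : Int) → ∀ prev,
      dfsB A B w k prev
        = (pyProduct ((PySem.List.pyRange ((A.length : Int) - (k : Int)) (A.length : Int) 1).map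
            (possPositions A B w))).filter (fun l => incChk l prev) := by
  intro k
  induction k with
  | zero =>
    intro _ prev
    rw [dfsB, PySem.List.pyRange_one_eq_nil (by omega)]
    simp [pyProduct, incChk]
  | succ k ih =>
    intro hk prev
    have hlt : (A.length : Int) - ((k : Int) + 1) < (A.length : Int) := by omega
    rw [dfsB]
    rw [show ((A.length : Int) - (((k : Nat) + 1 : Nat) : Int)) = (A.length : Int) - ((k : Int) + 1) by push_cast; ring] at *
    rw [PySem.List.pyRange_one_cons hlt]
    simp only [List.map_cons, pyProduct]
    rw [filter_flatMap_eq]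
    have hstep : (A.length : Int) - ((k : Int) + 1) + 1 = (A.length : Int) - (k : Int) := by omega
    have hrw : ∀ j : Int,
        ((pyProduct ((PySem.List.pyRange ((A.length : Int) - (k : Int)) (A.length : Int) 1).map
            (possPositions A B w))).map (j :: ·)).filter (fun t => incChk t prev)
          = if prev < j then (dfsB A B w k j).map (j :: ·) else [] := by
      intro j
      rw [filter_incChk_map_cons]
      rw [ih (by omega) j]
    symm
    rw [hstep]
    calc ((possPositions A B w ((A.length : Int) - ((k : Int) + 1))).flatMap fun x =>
            ((pyProduct ((PySem.List.pyRange ((A.length : Int) - (k : Int)) (A.length : Int) 1).map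
              (possPositions A B w))).map (x :: ·)).filter (fun l => incChk l prev))
        = (possPositions A B w ((A.length : Int) - ((k : Int) + 1))).flatMap (fun j =>
            if prev < j then (dfsB A B w k j).map (j :: ·) else []) := by
          exact List.flatMap_congr (fun j _ => hrw j)
      _ = (PySem.List.pyRange ((A.length : Int) - ((k : Int) + 1))
            ((B.length : Int) - ((A.length : Int) - ((A.length : Int) - ((k : Int) + 1)) - 1)) 1).flatMap
            (fun j =>
              if prev < j && ((PySem.List.pyGet? A ((A.length : Int) - ((k : Int) + 1)) == PySem.List.pyGet? B j)
                  || (PySem.List.pyGet? w ((A.length : Int) - ((k : Int) + 1))).getD false)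
              then (dfsB A B w k j).map (j :: ·) else []) := by
          rw [possPositions, flatMap_filter_eq]
          refine List.flatMap_congr (fun j _ => ?_)
          by_cases hc : ((PySem.List.pyGet? A ((A.length : Int) - ((k : Int) + 1)) == PySem.List.pyGet? B j)
              || (PySem.List.pyGet? w ((A.length : Int) - ((k : Int) + 1))).getD false) = true
          · by_cases hp : prev < j <;> simp [hc, hp]
          · simp only [Bool.not_eq_true] at hc
            simp [hc]

-- ===== VERDICT (by name: the statement is the Claim_ definition above) =====
theorem getAssignmentPermutations_spec : Claim_equal_getAssignmentPermutations := by
  intro A B w _hDom _hPre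
  unfold Spec_getAssignmentPermutations getAssignmentPermutations getAssignmentPermutations_alt
  split
  · rfl
  · split
    · rfl
    · have h := dfsB_eq_filter_product A B w A.length (by omega) (-1)
      rw [show ((A.length : Int) - (A.length : Int)) = (0 : Int) by ring] at h
      exact h.symm
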